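-- pv_equiv track=rewrite | github.com/Arksine/moonraker | scripts/sync_dependencies.py | gen_multline_var
-- ===== SOURCE A (Python) =====
-- from typing import Dict, List, Tuple
--
-- MAX_LINE_LENGTH = 88
--
-- def gen_multline_var(
--     var_name: str,
--     values: List[str],
--     indent: int = 0,
--     is_first: bool = True
-- ) -> str:
--     idt = " " * indent
--     if not values:
--         return f'{idt}{var_name}=""'
--     line_list: List[str] = []
--     if is_first:
--         current_line = f"{idt}{var_name}=\"{values.pop(0)}"
--     else:
--         current_line = (f"{idt}{var_name}=\"${{{var_name}}} {values.pop(0)}")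
--     for val in values:
--         if len(current_line) + len(val) + 2 > MAX_LINE_LENGTH:
--             line_list.append(f'{current_line}"')
--             current_line = (f"{idt}{var_name}=\"${{{var_name}}} {val}")
--         else:
--             current_line += f" {val}"
--     line_list.append(f'{current_line}"')
--     return "\n".join(line_list)
-- ===== SOURCE B (Python) =====
-- MAX_LINE_LENGTH = 88
--
--
-- def _rightmost(S, lo, hi, p, base):
--     # Largest m in [lo, hi] with p + S[m] - base <= MAX_LINE_LENGTH, or lo if
--     # none (S is nondecreasing, so the predicate is downward closed in m).
--     while lo < hi:
--         mid = (lo + hi + 1) // 2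
--         if p + S[mid] <= MAX_LINE_LENGTH + base:
--             lo = mid
--         else:
--             hi = mid - 1
--     return lo
--
--
-- def gen_multline_var(var_name, values, indent=0, is_first=True):
--     # Prefix-sum + binary-search line breaking: precompute cumulative
--     # token lengths once, then locate each line's break point by binary
--     # search and render the whole line in one slice-and-join step.
--     # Performs the same single values.pop(0) side effect as the original.
--     idt = " " * indent
--     if not values:
--         return f'{idt}{var_name}=""'
--     cont = f'{idt}{var_name}="${{{var_name}}} '
--     head = f'{idt}{var_name}="' if is_first else cont
--     toks = [values.pop(0)] + values
--     n = len(toks)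
--     S = [0]
--     for t in toks:
--         S.append(S[-1] + len(t) + 1)
--     lines = []
--     i = 0
--     pre = head
--     while i < n:
--         j = _rightmost(S, i + 1, n, len(pre), S[i])
--         lines.append(pre + " ".join(toks[i:j]) + '"')
--         i = j
--         pre = cont
--     return "\n".join(lines)
-- ===== Notes on version B (the rewrite author's own statement) =====
-- stated objective: alternative
-- what changed: A builds each line char-by-char in one token-at-a-time fold; B precomputes a prefix-sum array of token lengths once, then finds each line's break point by binary search over the prefix sums and renders the whole line with a single slice-and-join.
import Mathlib
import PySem

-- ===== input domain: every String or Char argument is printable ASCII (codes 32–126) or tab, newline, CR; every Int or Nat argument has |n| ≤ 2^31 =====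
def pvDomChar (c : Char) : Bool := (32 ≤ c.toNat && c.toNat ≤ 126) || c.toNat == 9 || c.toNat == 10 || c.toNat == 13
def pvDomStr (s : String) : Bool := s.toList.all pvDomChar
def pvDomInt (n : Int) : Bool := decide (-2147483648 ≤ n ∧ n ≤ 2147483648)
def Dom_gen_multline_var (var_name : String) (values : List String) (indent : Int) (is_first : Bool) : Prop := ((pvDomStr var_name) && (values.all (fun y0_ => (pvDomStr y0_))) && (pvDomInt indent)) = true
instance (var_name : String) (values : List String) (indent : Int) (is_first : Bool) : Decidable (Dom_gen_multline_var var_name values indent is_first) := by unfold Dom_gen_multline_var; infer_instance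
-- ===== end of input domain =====

-- B replaces A's token-at-a-time line-building fold by prefix sums of token lengths plus a
-- binary search for each line's break point; same return value, same pop(0) side effect.

-- ===== PORT A =====
def gen_multline_var (var_name : String) (values : List String) (indent : Int) (is_first : Bool) : String :=
  let idt : List Char := List.replicate indent.toNat ' '
  let vn : List Char := var_name.toList
  match values with
  | [] => String.ofList (idt ++ vn ++ ['=', '"', '"'])
  | v0 :: rest =>
    let current0 : List Char :=
      if is_first then idt ++ vn ++ ['=', '"'] ++ v0.toList
      else idt ++ vn ++ ['=', '"', '$', '{'] ++ vn ++ ['}', ' '] ++ v0.toList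
    let st := rest.foldl (fun (st : List (List Char) × List Char) v =>
      if st.2.length + v.toList.length + 2 > 88 then
        (st.1 ++ [st.2 ++ ['"']], idt ++ vn ++ ['=', '"', '$', '{'] ++ vn ++ ['}', ' '] ++ v.toList)
      else
        (st.1, st.2 ++ ' ' :: v.toList)) ([], current0)
    String.ofList (PySem.Chars.join ['\n'] (st.1 ++ [st.2 ++ ['"']]))

-- ===== PORT B =====
-- Source B's _rightmost: largest m in [lo, hi] with p + S[m] - base <= 88, or lo if none.
-- The while loop is ported with a fuel parameter (hi - lo suffices, since the
-- interval shrinks by at least one each iteration).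
def pvRight (S : List Nat) : Nat → Nat → Nat → Nat → Nat → Nat
  | 0, lo, _, _, _ => lo
  | fuel + 1, lo, hi, p, base =>
    if lo < hi then
      let mid := (lo + hi + 1) / 2
      if p + S.getD mid 0 ≤ 88 + base then pvRight S fuel mid hi p base
      else pvRight S fuel lo (mid - 1) p base
    else lo

-- Source B's while loop over line starts; fuel n suffices since i advances by ≥ 1
def pvLines (toks : List (List Char)) (S : List Nat) (contP : List Char) (n : Nat) :
    Nat → Nat → List Char → List (List Char)
  | 0, _, _ => []
  | fuel + 1, i, pre =>
    if i < n then
      let j := pvRight S (n - (i + 1)) (i + 1) n pre.length (S.getD i 0)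
      (pre ++ PySem.Chars.join [' '] ((toks.drop i).take (j - i)) ++ ['"']) ::
        pvLines toks S contP n fuel j contP
    else []

def gen_multline_var_alt (var_name : String) (values : List String) (indent : Int) (is_first : Bool) : String :=
  let idt : List Char := List.replicate indent.toNat ' '
  let vn : List Char := var_name.toList
  match values with
  | [] => String.ofList (idt ++ vn ++ ['=', '"', '"'])
  | v0 :: rest =>
    let cont : List Char := idt ++ vn ++ ['=', '"', '$', '{'] ++ vn ++ ['}', ' ']
    let head : List Char := if is_first then idt ++ vn ++ ['=', '"'] else cont
    let toks : List (List Char) := (v0 :: rest).map String.toList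
    -- S.append(S[-1] + len(t) + 1)
    let S : List Nat := toks.foldl (fun acc t => acc ++ [acc.getLastD 0 + t.length + 1]) [0]
    String.ofList (PySem.Chars.join ['\n'] (pvLines toks S cont toks.length toks.length 0 head))

-- ===== PRECONDITION & SPEC =====
def Spec_gen_multline_var (var_name : String) (values : List String) (indent : Int) (is_first : Bool) (out : String) : Prop := out = gen_multline_var_alt var_name values indent is_first
instance (var_name : String) (values : List String) (indent : Int) (is_first : Bool) (out : String) : Decidable (Spec_gen_multline_var var_name values indent is_first out) := by unfold Spec_gen_multline_var; infer_instance

-- ===== CLAIM (what is proved, stated in full; the proofs are below) =====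
def Claim_equal_gen_multline_var : Prop := ∀ (var_name : String) (values : List String) (indent : Int) (is_first : Bool), Dom_gen_multline_var var_name values indent is_first → Spec_gen_multline_var var_name values indent is_first (gen_multline_var var_name values indent is_first)

-- ===== LEMMAS AND PROOFS =====

-- prefix sum of (token length + 1) over the first k tokens
def pvPsum (toks : List (List Char)) (k : Nat) : Nat :=
  ((toks.take k).map (fun t => t.length + 1)).sum

-- the list Source B's S-building loop produces, in closed form
def pvSums (a : Nat) : List (List Char) → List Nat
  | [] => [a]
  | t :: ts => a :: pvSums (a + t.length + 1) ts

lemma pvSums_foldl (ts : List (List Char)) : ∀ (acc : List Nat) (a : Nat),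
    ts.foldl (fun acc t => acc ++ [acc.getLastD 0 + t.length + 1]) (acc ++ [a]) = acc ++ pvSums a ts := by
  induction ts with
  | nil => intro acc a; simp [pvSums]
  | cons t ts ih =>
    intro acc a
    simp only [List.foldl_cons, List.getLastD_concat, pvSums]
    have := ih (acc ++ [a]) (a + t.length + 1)
    simpa [List.append_assoc] using this

lemma pvSums_getD : ∀ (ts : List (List Char)) (a m : Nat), m ≤ ts.length →
    (pvSums a ts).getD m 0 = a + pvPsum ts m := by
  intro ts
  induction ts with
  | nil =>
    intro a m hm
    simp only [List.length_nil, Nat.le_zero] at hm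
    subst hm
    simp [pvSums, pvPsum]
  | cons t ts ih =>
    intro a m hm
    cases m with
    | zero => simp [pvSums, pvPsum]
    | succ m =>
      simp only [pvSums, List.getD_cons_succ]
      rw [ih _ m (by simpa using hm)]
      have h : pvPsum (t :: ts) (m + 1) = t.length + 1 + pvPsum ts m := by
        simp [pvPsum, List.take_succ_cons]
      rw [h]; omega

lemma pvPsum_mono (toks : List (List Char)) (k m : Nat) (hkm : k ≤ m) :
    pvPsum toks k ≤ pvPsum toks m := by
  unfold pvPsum
  have h : toks.take k = (toks.take m).take k := by rw [List.take_take, Nat.min_eq_left hkm]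
  rw [h]
  exact List.Sublist.sum_le_sum (((toks.take m).take_sublist k).map _) (by simp)

lemma pvPsum_succ (toks : List (List Char)) (k : Nat) (hk : k < toks.length) :
    pvPsum toks (k + 1) = pvPsum toks k + (toks.getD k []).length + 1 := by
  unfold pvPsum
  rw [List.map_take, List.map_take, List.sum_take_succ _ _ (by simpa using hk)]
  simp [List.getD, List.getElem?_eq_getElem hk]
  omega

lemma pvJoin_len : ∀ (g : List (List Char)), g ≠ [] →
    (PySem.Chars.join [' '] g).length + 1 = (g.map (fun t => t.length + 1)).sum := by
  intro g
  induction g with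
  | nil => intro h; exact absurd rfl h
  | cons a t ih =>
    intro _
    cases t with
    | nil => simp [PySem.Chars.join_singleton]
    | cons b t' =>
      rw [PySem.Chars.join_cons_cons]
      have h2 := ih (by simp)
      simp only [List.map_cons, List.sum_cons, List.length_append, List.length_cons,
        List.length_nil] at h2 ⊢
      omega

lemma pvJoin_snoc (xs : List (List Char)) (x : List Char) (h : xs ≠ []) :
    PySem.Chars.join [' '] (xs ++ [x]) = PySem.Chars.join [' '] xs ++ ' ' :: x := by
  induction xs with
  | nil => exact absurd rfl h
  | cons a t ih =>
    cases t with
    | nil => simp [PySem.Chars.join_cons_cons, PySem.Chars.join_singleton]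
    | cons b t' =>
      simp only [List.cons_append, PySem.Chars.join_cons_cons] at *
      simp [ih (by simp)]

lemma pvSl_one (toks : List (List Char)) (i : Nat) (hi : i < toks.length) :
    (toks.drop i).take 1 = [toks.getD i []] := by
  have h : toks.getD i [] = toks[i] := by simp [List.getD, List.getElem?_eq_getElem hi]
  rw [h, List.drop_eq_getElem_cons hi, List.take_succ_cons, List.take_zero]

lemma pvSl_snoc (toks : List (List Char)) (i k : Nat) (hik : i ≤ k) (hk : k < toks.length) :
    (toks.drop i).take (k + 1 - i) = (toks.drop i).take (k - i) ++ [toks.getD k []] := by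
  have h1 : k + 1 - i = (k - i) + 1 := by omega
  rw [h1, List.take_add_one, List.getElem?_drop]
  have h2 : i + (k - i) = k := by omega
  rw [h2, List.getElem?_eq_getElem hk]
  simp [List.getD, List.getElem?_eq_getElem hk]

lemma pvSl_ne_nil (toks : List (List Char)) (i k : Nat) (hik : i < k) (hk : k ≤ toks.length) :
    (toks.drop i).take (k - i) ≠ [] := by
  have hlen : ((toks.drop i).take (k - i)).length = k - i := by
    rw [List.length_take, List.length_drop]; omega
  intro h; rw [h] at hlen; simp at hlen; omega

lemma pvSl_sum (toks : List (List Char)) (i : Nat) : ∀ (k : Nat), i ≤ k → k ≤ toks.length →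
    pvPsum toks i + (((toks.drop i).take (k - i)).map (fun t => t.length + 1)).sum = pvPsum toks k := by
  intro k
  induction k with
  | zero =>
    intro h1 _
    have h : i = 0 := by omega
    subst h
    simp [pvPsum]
  | succ k ih =>
    intro h1 h2
    by_cases hik : i = k + 1
    · simp [hik]
    · have hik' : i ≤ k := by omega
      have hk : k < toks.length := by omega
      rw [pvSl_snoc toks i k hik' hk, pvPsum_succ toks k hk]
      have := ih hik' (by omega)
      simp only [List.map_append, List.sum_append, List.map_cons, List.sum_cons,
        List.map_nil, List.sum_nil]
      omega

-- length of a partially built line: cur = pre ++ " ".join(toks[i:k])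
lemma pvCurLen (toks : List (List Char)) (pre : List Char) (i k : Nat)
    (hik : i < k) (hk : k ≤ toks.length) :
    (pre ++ PySem.Chars.join [' '] ((toks.drop i).take (k - i))).length + 1 + pvPsum toks i
      = pre.length + pvPsum toks k := by
  have hj := pvJoin_len _ (pvSl_ne_nil toks i k hik hk)
  have hs := pvSl_sum toks i k (by omega) hk
  simp only [List.length_append]
  omega

-- binary search specification (needs S nondecreasing up to hi and enough fuel)
lemma pvRight_spec (S : List Nat) (p base : Nat) : ∀ (fuel lo hi : Nat),
    (∀ k m, k ≤ m → m ≤ hi → S.getD k 0 ≤ S.getD m 0) → lo ≤ hi → hi - lo ≤ fuel →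
    lo ≤ pvRight S fuel lo hi p base ∧ pvRight S fuel lo hi p base ≤ hi ∧
    (∀ m, lo < m → m ≤ pvRight S fuel lo hi p base → p + S.getD m 0 ≤ 88 + base) ∧
    (pvRight S fuel lo hi p base < hi → ¬ (p + S.getD (pvRight S fuel lo hi p base + 1) 0 ≤ 88 + base)) := by
  intro fuel
  induction fuel with
  | zero =>
    intro lo hi hmono hlohi hfuel
    have h : lo = hi := by omega
    subst h
    exact ⟨le_refl _, le_refl _, by intro m hm1 hm2; simp [pvRight] at hm2 ⊢; omega,
      by simp [pvRight]⟩
  | succ fuel ih =>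
    intro lo hi hmono hlohi hfuel
    by_cases h : lo < hi
    · rw [pvRight, if_pos h]
      set mid := (lo + hi + 1) / 2 with hmid
      have hmidb : lo < mid ∧ mid ≤ hi := by omega
      by_cases cond : p + S.getD mid 0 ≤ 88 + base
      · rw [if_pos cond]
        obtain ⟨h1, h2, h3, h4⟩ := ih mid hi hmono hmidb.2 (by omega)
        refine ⟨by omega, h2, ?_, h4⟩
        intro m hm1 hm2
        by_cases hmm : m ≤ mid
        · exact le_trans (by have := hmono m mid hmm hmidb.2; omega) cond
        · exact h3 m (by omega) hm2
      · rw [if_neg cond]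
        have hmono' : ∀ k m, k ≤ m → m ≤ mid - 1 → S.getD k 0 ≤ S.getD m 0 := by
          intro k m hk hm; exact hmono k m hk (by omega)
        obtain ⟨h1, h2, h3, h4⟩ := ih lo (mid - 1) hmono' (by omega) (by omega)
        refine ⟨h1, by omega, h3, ?_⟩
        intro _
        by_cases hr : pvRight S fuel lo (mid - 1) p base < mid - 1
        · exact h4 hr
        · have he : pvRight S fuel lo (mid - 1) p base = mid - 1 := by omega
          rw [he, show mid - 1 + 1 = mid from by omega]
          omega
    · rw [pvRight, if_neg h]
      exact ⟨le_refl _, by omega, by intro m hm1 hm2; omega, by omega⟩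

-- A's loop body, with the continuation prefix abstracted out
def pvStepA (PC : List Char) (st : List (List Char) × List Char) (v : List Char) : List (List Char) × List Char :=
  if st.2.length + v.length + 2 > 88 then (st.1 ++ [st.2 ++ ['"']], PC ++ v)
  else (st.1, st.2 ++ ' ' :: v)

-- A's fold plus the final line flush
def pvOutA (PC : List Char) (ts : List (List Char)) (lines : List (List Char)) (cur : List Char) : List (List Char) :=
  ((ts.foldl (pvStepA PC) (lines, cur)).1) ++ [(ts.foldl (pvStepA PC) (lines, cur)).2 ++ ['"']]

lemma pvOutA_nil (PC : List Char) (lines : List (List Char)) (cur : List Char) :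
    pvOutA PC [] lines cur = lines ++ [cur ++ ['"']] := by
  simp [pvOutA]

lemma pvOutA_cons (PC v : List Char) (ts : List (List Char)) (lines : List (List Char)) (cur : List Char) :
    pvOutA PC (v :: ts) lines cur =
      if cur.length + v.length + 2 > 88 then pvOutA PC ts (lines ++ [cur ++ ['"']]) (PC ++ v)
      else pvOutA PC ts lines (cur ++ ' ' :: v) := by
  by_cases h : cur.length + v.length + 2 > 88 <;> simp [pvOutA, pvStepA, h]

-- MAIN invariant: from a line start i, A's remaining fold produces exactly B's remaining lines
lemma pv_main (toks : List (List Char)) (PC : List Char) (S : List Nat)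
    (HS : ∀ m, m ≤ toks.length → S.getD m 0 = pvPsum toks m) :
    ∀ (fuel i : Nat) (pre : List Char) (lines : List (List Char)),
      toks.length - i ≤ fuel → i < toks.length →
      pvOutA PC (toks.drop (i + 1)) lines (pre ++ toks.getD i [])
        = lines ++ pvLines toks S PC toks.length fuel i pre := by
  intro fuel
  induction fuel with
  | zero => intro i pre lines hfuel hi; omega
  | succ fuel ih =>
    intro i pre lines _hfuel hi
    have hmono : ∀ k m, k ≤ m → m ≤ toks.length → S.getD k 0 ≤ S.getD m 0 := by
      intro k m hkm hm
      rw [HS k (by omega), HS m hm]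
      exact pvPsum_mono toks k m hkm
    obtain ⟨hj1, hj2, hj3, hj4⟩ :=
      pvRight_spec S pre.length (S.getD i 0) (toks.length - (i + 1)) (i + 1) toks.length
        hmono (by omega) (by omega)
    set j := pvRight S (toks.length - (i + 1)) (i + 1) toks.length pre.length (S.getD i 0) with hjdef
    have hfit : ∀ m, i + 1 < m → m ≤ j → pre.length + pvPsum toks m ≤ 88 + pvPsum toks i := by
      intro m h1 h2
      have := hj3 m h1 h2
      rwa [HS m (by omega), HS i (by omega)] at this
    have hstop : j < toks.length → ¬ (pre.length + pvPsum toks (j + 1) ≤ 88 + pvPsum toks i) := by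
      intro h
      have := hj4 h
      rwa [HS (j + 1) (by omega), HS i (by omega)] at this
    have hunf : pvLines toks S PC toks.length (fuel + 1) i pre =
        (pre ++ PySem.Chars.join [' '] ((toks.drop i).take (j - i)) ++ ['"']) ::
          pvLines toks S PC toks.length fuel j PC := by
      rw [pvLines]
      simp only [if_pos hi, ← hjdef]
    -- inner induction: from token k (i < k ≤ j) with the line partially built
    have inner : ∀ (d k : Nat), j - k ≤ d → i < k → k ≤ j →
        pvOutA PC (toks.drop k) lines (pre ++ PySem.Chars.join [' '] ((toks.drop i).take (k - i)))
          = lines ++ pvLines toks S PC toks.length (fuel + 1) i pre := by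
      intro d
      induction d with
      | zero =>
        intro k hd hik hkj
        have hkj' : k = j := by omega
        subst hkj'
        rw [hunf]
        by_cases hjn : j < toks.length
        · -- flush: token j does not fit on this line
          rw [List.drop_eq_getElem_cons hjn]
          have hgetd : toks[j] = toks.getD j [] := by
            simp [List.getD, List.getElem?_eq_getElem hjn]
          have hcl := pvCurLen toks pre i j hik (by omega)
          have hbig : (pre ++ PySem.Chars.join [' '] ((toks.drop i).take (j - i))).length
              + (toks.getD j []).length + 2 > 88 := by
            have h1 := hstop hjn
            have h2 := pvPsum_succ toks j hjn
            omega
          rw [hgetd, pvOutA_cons]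
          simp only [hbig, if_pos]
          rw [ih j PC (lines ++ [pre ++ PySem.Chars.join [' '] ((toks.drop i).take (j - i)) ++ ['"']])
            (by omega) hjn]
          simp [List.append_assoc]
        · -- j = toks.length: nothing left, close the final line
          have hjn' : j = toks.length := by omega
          rw [show toks.drop j = [] from by rw [List.drop_eq_nil_iff]; omega, pvOutA_nil]
          have hempty : pvLines toks S PC toks.length fuel j PC = [] := by
            cases fuel <;> simp [pvLines, hjn']
          simp [hempty, List.append_assoc]
      | succ d ihd =>
        intro k hd hik hkj
        by_cases hkj' : k = j
        · exact ihd k (by omega) hik hkj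
        · -- token k still fits: append it to the current line
          have hkj2 : k < j := by omega
          have hkn : k < toks.length := by omega
          rw [List.drop_eq_getElem_cons hkn]
          have hgetd : toks[k] = toks.getD k [] := by
            simp [List.getD, List.getElem?_eq_getElem hkn]
          have hcl := pvCurLen toks pre i k hik (by omega)
          have hfits : ¬ ((pre ++ PySem.Chars.join [' '] ((toks.drop i).take (k - i))).length
              + (toks.getD k []).length + 2 > 88) := by
            have h1 := hfit (k + 1) (by omega) (by omega)
            have h2 := pvPsum_succ toks k hkn
            omega
          rw [hgetd, pvOutA_cons]
          simp only [hfits, if_neg, not_false_iff]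
          have hsnoc : (pre ++ PySem.Chars.join [' '] ((toks.drop i).take (k - i))) ++ ' ' :: toks.getD k []
              = pre ++ PySem.Chars.join [' '] ((toks.drop i).take (k + 1 - i)) := by
            rw [pvSl_snoc toks i k (by omega) hkn,
              pvJoin_snoc _ _ (pvSl_ne_nil toks i k hik (by omega))]
            simp [List.append_assoc]
          rw [hsnoc]
          exact ihd (k + 1) (by omega) (by omega) (by omega)
    have h1 : (toks.drop i).take (i + 1 - i) = [toks.getD i []] := by
      rw [show i + 1 - i = 1 from by omega]
      exact pvSl_one toks i hi
    have := inner (j - (i + 1)) (i + 1) (by omega) (by omega) (by omega)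
    rw [h1, PySem.Chars.join_singleton] at this
    exact this

-- ===== VERDICT (by name: the statement is the Claim_ definition above) =====
theorem gen_multline_var_spec : Claim_equal_gen_multline_var := by
  intro var_name values indent is_first _
  unfold Spec_gen_multline_var
  cases values with
  | nil => rfl
  | cons v0 rest =>
    simp only [gen_multline_var, gen_multline_var_alt]
    refine congrArg String.ofList (congrArg (PySem.Chars.join ['\n']) ?_)
    set idt : List Char := List.replicate indent.toNat ' ' with hidt
    set vn : List Char := var_name.toList with hvn
    set PC : List Char := idt ++ vn ++ ['=', '"', '$', '{'] ++ vn ++ ['}', ' '] with hPC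
    set toks : List (List Char) := (v0 :: rest).map String.toList with htoks
    have hS : toks.foldl (fun acc t => acc ++ [acc.getLastD 0 + t.length + 1]) [0] = pvSums 0 toks := by
      have := pvSums_foldl toks [] 0
      simpa using this
    rw [hS]
    have hfun : (fun (st : List (List Char) × List Char) (v : String) =>
        if st.2.length + v.toList.length + 2 > 88 then
          (st.1 ++ [st.2 ++ ['"']], idt ++ vn ++ ['=', '"', '$', '{'] ++ vn ++ ['}', ' '] ++ v.toList)
        else (st.1, st.2 ++ ' ' :: v.toList))
        = (fun st v => pvStepA PC st v.toList) := by
      funext st v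
      simp [pvStepA, hPC, List.append_assoc]
    rw [hfun, ← List.foldl_map (f := String.toList) (g := pvStepA PC)]
    have hdrop : rest.map String.toList = toks.drop 1 := by simp [htoks]
    have hget0 : v0.toList = toks.getD 0 [] := by simp [htoks]
    have hmain := pv_main toks PC (pvSums 0 toks)
      (by intro m hm; rw [pvSums_getD toks 0 m hm]; omega)
      toks.length 0
      (if is_first then idt ++ vn ++ ['=', '"'] else PC) []
      (by omega) (by simp [htoks])
    have hcur0 : (if is_first then idt ++ vn ++ ['=', '"'] ++ v0.toList
        else idt ++ vn ++ ['=', '"', '$', '{'] ++ vn ++ ['}', ' '] ++ v0.toList)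
        = (if is_first then idt ++ vn ++ ['=', '"'] else PC) ++ toks.getD 0 [] := by
      cases is_first <;> simp [hPC, htoks, List.append_assoc]
    rw [hdrop, hcur0] at *
    have := hmain
    unfold pvOutA at this
    simp only [List.nil_append] at this
    exact this
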